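-- pv_equiv track=rewrite | github.com/tomMcGrath/rationalnews | propjourn.py | parse_keywords_old
-- ===== SOURCE A (Python) =====
-- def parse_keywords_old(x):
--     """Parses given string to generate a list of keywords. For example:
--
--     >>> parse_keywords('brain OR breast AND tumour OR tumor OR cancer | heart OR lung OR brain AND disease OR disorder OR issue')
--     [['brain tumour',
--       'brain tumor',
--       'brain cancer',
--       'breast tumour',
--       'breast tumor',
--       'breast cancer'],
--      ['heart disease',
--       'heart disorder',
--       'heart issue',
--       'lung disease',
--       'lung disorder',
--       'lung issue',
--       'brain disease',
--       'brain disorder',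
--       'brain issue']]
--     """
--     from itertools import product
--     tokens = x.split('|')
--     toks_all = list()
--     for token in tokens:
--         toks = token.split('AND')
--         toks_curr = list()
--         for tok in toks:
--             t = tok.split('OR')
--             t = [s.strip() for s in t]
--             toks_curr.append(t)
--         toks_all.append([' '.join(i).strip().lower() for i in product(*toks_curr, repeat=1)])
--     return toks_all
-- ===== SOURCE B (Python) =====
-- def parse_keywords_old(x):
--     out = []
--     for section in x.split('|'):
--         groups = [[s.strip() for s in part.split('OR')] for part in section.split('AND')]
--         total = 1
--         for g in groups:
--             total *= len(g)
--         combos = []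
--         for k in range(total):
--             toks = []
--             rem = k
--             for g in reversed(groups):
--                 rem, d = divmod(rem, len(g))
--                 toks.append(g[d])
--             toks.reverse()
--             combos.append(' '.join(toks).strip().lower())
--         out.append(combos)
--     return out
-- ===== Notes on version B (the rewrite author's own statement) =====
-- stated objective: alternative
-- what changed: itertools.product is replaced by mixed-radix index decoding: one loop over range(product of group sizes) reconstructs each combination from its index via divmod over the reversed groups, so no intermediate collection of partial tuples is ever built.
import Mathlib
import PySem

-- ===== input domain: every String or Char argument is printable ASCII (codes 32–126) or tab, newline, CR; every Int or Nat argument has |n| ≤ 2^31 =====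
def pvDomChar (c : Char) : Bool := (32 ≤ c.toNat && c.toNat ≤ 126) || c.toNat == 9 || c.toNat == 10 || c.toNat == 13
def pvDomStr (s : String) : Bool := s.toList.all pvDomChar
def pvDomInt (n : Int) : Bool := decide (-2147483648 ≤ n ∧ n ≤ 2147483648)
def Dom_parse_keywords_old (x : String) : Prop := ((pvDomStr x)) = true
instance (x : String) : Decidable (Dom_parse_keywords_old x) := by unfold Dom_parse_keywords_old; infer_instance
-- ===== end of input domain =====

-- B replaces itertools.product by mixed-radix index decoding: each combination is
-- reconstructed from its index k in range(product of group sizes) via divmod (alternative algorithm, same cost).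

-- ===== PORT A =====
-- itertools.product over the list of groups, first factor varying slowest (exact order)
def pvProdA (gs : List (List String)) : List (List String) :=
  match gs with
  | [] => [[]]
  | g :: rest => g.flatMap (fun o => (pvProdA rest).map (fun t => o :: t))

def parse_keywords_old (x : String) : List (List String) :=
  ((PySem.Str.split? x "|").getD []).map (fun token =>
    let toks_curr := ((PySem.Str.split? token "AND").getD []).map (fun tok =>
      ((PySem.Str.split? tok "OR").getD []).map PySem.Str.strip)
    (pvProdA toks_curr).map (fun i =>
      PySem.Str.lower (PySem.Str.strip (PySem.Str.join " " i))))

-- ===== PORT B =====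
-- one step of B's inner loop: rem, d = divmod(rem, len(g)); toks.append(g[d])
def pvDigitStep (st : List String × Int) (g : List String) : List String × Int :=
  (st.1 ++ [(PySem.List.pyGet? g (PySem.Int.mod st.2 (g.length : Int))).getD ""],
   PySem.Int.floordiv st.2 (g.length : Int))

def parse_keywords_old_alt (x : String) : List (List String) :=
  ((PySem.Str.split? x "|").getD []).map (fun sect =>
    let groups := ((PySem.Str.split? sect "AND").getD []).map (fun part =>
      ((PySem.Str.split? part "OR").getD []).map PySem.Str.strip)
    let total := groups.foldl (fun t g => t * (g.length : Int)) 1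
    (PySem.List.pyRange 0 total 1).map (fun k =>
      let toks := (groups.reverse.foldl pvDigitStep ([], k)).1
      PySem.Str.lower (PySem.Str.strip (PySem.Str.join " " toks.reverse))))

-- ===== PRECONDITION & SPEC =====
def Spec_parse_keywords_old (x : String) (out : List (List String)) : Prop := out = parse_keywords_old_alt x
instance (x : String) (out : List (List String)) : Decidable (Spec_parse_keywords_old x out) := by unfold Spec_parse_keywords_old; infer_instance

-- ===== CLAIM (what is proved, stated in full; the proofs are below) =====
def Claim_equal_parse_keywords_old : Prop := ∀ (x : String), Dom_parse_keywords_old x → Spec_parse_keywords_old x (parse_keywords_old x)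

-- ===== LEMMAS AND PROOFS =====

-- splitOn never returns the empty list (each '|'/'AND'/'OR' section list is nonempty)
theorem pvSplitOnGo_ne_nil (sep : List Char) (fuel : Nat) :
    ∀ (l cur : List Char) (acc : List (List Char)),
      PySem.Chars.splitOn.go sep fuel l cur acc ≠ [] := by
  induction fuel with
  | zero => intro l cur acc; simp [PySem.Chars.splitOn.go]
  | succ n ih =>
      intro l cur acc
      cases l with
      | nil => simp [PySem.Chars.splitOn.go]
      | cons c rest =>
          rw [PySem.Chars.splitOn.go]
          split
          · exact ih _ _ _
          · exact ih _ _ _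

-- the integer product of the group lengths
def pvProdLen (gs : List (List String)) : Int := ((gs.map List.length).prod : Nat)

theorem pvProdLen_cons (g : List String) (t : List (List String)) :
    pvProdLen (g :: t) = (g.length : Int) * pvProdLen t := by
  simp [pvProdLen]

theorem pvProdLen_pos (gs : List (List String)) (h : ∀ g ∈ gs, g ≠ []) :
    0 < pvProdLen gs := by
  induction gs with
  | nil => simp [pvProdLen]
  | cons g t ih =>
      rw [pvProdLen_cons]
      have hg : g ≠ [] := h g (by simp)
      have : 0 < g.length := List.length_pos_iff.mpr hg
      have ht := ih (fun g hg => h g (by simp [hg]))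
      positivity

theorem pvProdLen_reverse (gs : List (List String)) :
    pvProdLen gs.reverse = pvProdLen gs := by
  simp [pvProdLen, List.prod_reverse]

-- B's running 'total' is that product
theorem pvTotal_eq (gs : List (List String)) :
    gs.foldl (fun t g => t * (g.length : Int)) 1 = pvProdLen gs := by
  suffices h : ∀ a : Int, gs.foldl (fun t g => t * (g.length : Int)) a = a * pvProdLen gs by
    simpa using h 1
  induction gs with
  | nil => intro a; simp [pvProdLen]
  | cons g t ih => intro a; simp [List.foldl_cons, ih, pvProdLen_cons]; ring

-- least-significant-first digit decode, the pure form of B's inner loop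
def pvD : List (List String) → Int → List String
  | [], _ => []
  | g :: t, k =>
      (PySem.List.pyGet? g (PySem.Int.mod k (g.length : Int))).getD "" ::
        pvD t (PySem.Int.floordiv k (g.length : Int))

-- the running quotient after peeling a list of groups
def pvQ : List (List String) → Int → Int
  | [], k => k
  | g :: t, k => pvQ t (PySem.Int.floordiv k (g.length : Int))

theorem pvFold_eq (rgs : List (List String)) :
    ∀ (acc : List String) (k : Int),
      rgs.foldl pvDigitStep (acc, k) = (acc ++ pvD rgs k, pvQ rgs k) := by
  induction rgs with
  | nil => intro acc k; simp [pvD, pvQ]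
  | cons g t ih =>
      intro acc k
      simp [List.foldl_cons, pvDigitStep, ih, pvD, pvQ]

theorem pvD_append (a b : List (List String)) (k : Int) :
    pvD (a ++ b) k = pvD a k ++ pvD b (pvQ a k) := by
  induction a generalizing k with
  | nil => simp [pvD, pvQ]
  | cons g t ih => simp [pvD, pvQ, ih]

theorem pvQ_eq_div (a : List (List String)) (h : ∀ g ∈ a, g ≠ []) (k : Int) :
    pvQ a k = k / pvProdLen a := by
  induction a generalizing k with
  | nil => simp [pvQ, pvProdLen]
  | cons g t ih =>
      have hg : g ≠ [] := h g (by simp)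
      have hL : 0 < (g.length : Int) := by
        exact_mod_cast List.length_pos_iff.mpr hg
      have ht : ∀ x ∈ t, x ≠ [] := fun x hx => h x (by simp [hx])
      rw [pvQ, ih ht, PySem.Int.floordiv_eq_ediv_of_pos hL, pvProdLen_cons,
        Int.ediv_ediv_of_nonneg (le_of_lt hL)]

-- low digits depend only on k mod the product
theorem pvD_mod (rgs : List (List String)) (h : ∀ g ∈ rgs, g ≠ []) :
    ∀ (q r : Int), 0 ≤ r → r < pvProdLen rgs →
      pvD rgs (q * pvProdLen rgs + r) = pvD rgs r := by
  induction rgs with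
  | nil => intro q r _ _; simp [pvD]
  | cons g t ih =>
      intro q r hr0 hr
      have hg : g ≠ [] := h g (by simp)
      have hL : 0 < (g.length : Int) := by
        exact_mod_cast List.length_pos_iff.mpr hg
      have ht : ∀ x ∈ t, x ≠ [] := fun x hx => h x (by simp [hx])
      have hM : 0 < pvProdLen t := pvProdLen_pos t ht
      rw [pvProdLen_cons] at hr
      set L : Int := (g.length : Int)
      set M : Int := pvProdLen t
      have hkey : q * (L * M) + r = r + (q * M) * L := by ring
      have hmod : PySem.Int.mod (q * (L * M) + r) L = PySem.Int.mod r L := by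
        rw [PySem.Int.mod_eq_emod_of_pos hL, PySem.Int.mod_eq_emod_of_pos hL, hkey,
          Int.add_mul_emod_self_right]
      have hdiv : PySem.Int.floordiv (q * (L * M) + r) L = q * M + r / L := by
        rw [PySem.Int.floordiv_eq_ediv_of_pos hL, hkey,
          Int.add_mul_ediv_right _ _ (ne_of_gt hL)]
        ring
      have hrL0 : 0 ≤ r / L := Int.ediv_nonneg hr0 (le_of_lt hL)
      have hrLM : r / L < M := by
        rw [Int.ediv_lt_iff_lt_mul hL]
        calc r < L * M := hr
        _ = M * L := by ring
      rw [pvProdLen_cons, pvD, pvD, hmod, hdiv, ih ht q (r / L) hrL0 hrLM,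
        PySem.Int.floordiv_eq_ediv_of_pos hL]

-- split range(0, l*M) into l blocks of length M
theorem pvRangeSplit (l : Nat) (M : Int) (hM : 0 ≤ M) :
    PySem.List.pyRange 0 ((l : Int) * M) 1 =
      ((List.range l).map
        (fun q : Nat => (PySem.List.pyRange 0 M 1).map (fun r => (q : Int) * M + r))).flatten := by
  induction l with
  | zero => simp [PySem.List.pyRange_one_eq_nil]
  | succ n ih =>
      have h1 : (0 : Int) ≤ (n : Int) * M := by positivity
      have h2 : (n : Int) * M ≤ ((n : Int) + 1) * M := by nlinarith
      rw [List.range_succ, List.map_append, List.flatten_append, ← ih]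
      push_cast
      rw [PySem.List.pyRange_one_append 0 ((n : Int) * M) (((n : Int) + 1) * M) h1 h2]
      congr 1
      rw [PySem.List.pyRange_one ((n : Int) * M) (((n : Int) + 1) * M),
        PySem.List.pyRange_one 0 M]
      have hd : ((n : Int) + 1) * M - (n : Int) * M = M := by ring
      simp [hd, List.map_map, Function.comp_def]

-- the decoded combination at index k, most significant group first
def pvE (gs : List (List String)) (k : Int) : List String := (pvD gs.reverse k).reverse

theorem pvE_cons (g : List String) (rest : List (List String))
    (h : ∀ x ∈ g :: rest, x ≠ []) (k : Int) :
    pvE (g :: rest) k =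
      (PySem.List.pyGet? g (PySem.Int.mod (k / pvProdLen rest) (g.length : Int))).getD "" ::
        pvE rest k := by
  have hrest : ∀ x ∈ rest, x ≠ [] := fun x hx => h x (by simp [hx])
  have hrev : ∀ x ∈ rest.reverse, x ≠ [] := fun x hx => hrest x (List.mem_reverse.mp hx)
  unfold pvE
  rw [show (g :: rest).reverse = rest.reverse ++ [g] by simp,
    pvD_append, pvQ_eq_div rest.reverse hrev, pvProdLen_reverse]
  simp [pvD]

-- each list equals the range of its length mapped through getD
theorem pvMapGetD (g : List String) :
    (List.range g.length).map (fun q => g.getD q "") = g := by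
  apply List.ext_getElem
  · simp
  · intro i h1 h2
    simp [List.getD_eq_getElem?_getD, List.getElem?_eq_getElem h2]

-- the enumeration of all indices decodes to exactly itertools.product's list
theorem pvMain (gs : List (List String)) (h : ∀ g ∈ gs, g ≠ []) :
    (PySem.List.pyRange 0 (pvProdLen gs) 1).map (pvE gs) = pvProdA gs := by
  induction gs with
  | nil => rfl
  | cons g rest ih =>
      have hg : g ≠ [] := h g (by simp)
      have hrest : ∀ x ∈ rest, x ≠ [] := fun x hx => h x (by simp [hx])
      have hM : 0 < pvProdLen rest := pvProdLen_pos rest hrest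
      rw [pvProdLen_cons, show ((g.length : Int)) = ((g.length : Nat) : Int) by rfl,
        pvRangeSplit g.length (pvProdLen rest) (le_of_lt hM), List.map_flatten,
        List.map_map]
      have hstep : ∀ q : Nat, q < g.length →
          ((PySem.List.pyRange 0 (pvProdLen rest) 1).map
            (fun r => (q : Int) * pvProdLen rest + r)).map (pvE (g :: rest)) =
          (pvProdA rest).map (fun t => g.getD q "" :: t) := by
        intro q hqlt
        rw [List.map_map, ← ih hrest, List.map_map]
        apply List.map_congr_left
        intro r hr
        have hr' := (PySem.List.mem_pyRange_one).mp hr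
        have hE := pvE_cons g rest h ((q : Int) * pvProdLen rest + r)
        have hdivq : ((q : Int) * pvProdLen rest + r) / pvProdLen rest = (q : Int) := by
          rw [show (q : Int) * pvProdLen rest + r = r + (q : Int) * pvProdLen rest by ring,
            Int.add_mul_ediv_right r (q : Int) (ne_of_gt hM),
            Int.ediv_eq_zero_of_lt hr'.1 hr'.2]
          ring
        have hmodq : PySem.Int.mod ((q : Int)) ((g.length : Int)) = (q : Int) := by
          rw [PySem.Int.mod_natCast, Nat.mod_eq_of_lt hqlt]
        have hget : (PySem.List.pyGet? g ((q : Int))).getD "" = g.getD q "" := by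
          rw [PySem.List.pyGet?_natCast]
          simp [List.getD_eq_getElem?_getD]
        have hmodD : pvE rest ((q : Int) * pvProdLen rest + r) = pvE rest r := by
          unfold pvE
          have hrev : ∀ x ∈ rest.reverse, x ≠ [] := fun x hx => hrest x (List.mem_reverse.mp hx)
          rw [show (q : Int) * pvProdLen rest = (q : Int) * pvProdLen rest.reverse by
            rw [pvProdLen_reverse]]
          rw [pvD_mod rest.reverse hrev (q : Int) r hr'.1 (by rw [pvProdLen_reverse]; exact hr'.2)]
        rw [Function.comp_apply, hE, hdivq, hmodq, hget, hmodD]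
        rfl
      calc ((List.range g.length).map (fun q : Nat =>
              ((PySem.List.pyRange 0 (pvProdLen rest) 1).map
                (fun r => (q : Int) * pvProdLen rest + r)).map (pvE (g :: rest)))).flatten
          = ((List.range g.length).map (fun q : Nat =>
              (pvProdA rest).map (fun t => g.getD q "" :: t))).flatten := by
            congr 1
            apply List.map_congr_left
            intro q hq
            exact hstep q (List.mem_range.mp hq)
        _ = pvProdA (g :: rest) := by
            show _ = g.flatMap (fun o => (pvProdA rest).map (fun t => o :: t))
            rw [List.flatMap_def]
            conv_rhs => rw [← pvMapGetD g]
            rw [List.map_map]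
            simp [Function.comp_def]

-- per-section equality: B's inner loops produce A's product
theorem pvSection_eq (gs : List (List String)) (h : ∀ g ∈ gs, g ≠ []) :
    (PySem.List.pyRange 0 (gs.foldl (fun t g => t * (g.length : Int)) 1) 1).map
      (fun k => ((gs.reverse.foldl pvDigitStep ([], k)).1).reverse) = pvProdA gs := by
  rw [pvTotal_eq]
  calc (PySem.List.pyRange 0 (pvProdLen gs) 1).map
        (fun k => ((gs.reverse.foldl pvDigitStep ([], k)).1).reverse)
      = (PySem.List.pyRange 0 (pvProdLen gs) 1).map (pvE gs) := by
        apply List.map_congr_left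
        intro k _
        rw [pvFold_eq]
        simp [pvE]
    _ = pvProdA gs := pvMain gs h

-- ===== VERDICT (by name: the statement is the Claim_ definition above) =====
theorem parse_keywords_old_spec : Claim_equal_parse_keywords_old := by
  intro x _
  unfold Spec_parse_keywords_old parse_keywords_old parse_keywords_old_alt
  dsimp only
  apply List.map_congr_left
  intro sect _
  have hne : ∀ g ∈ ((PySem.Str.split? sect "AND").getD []).map (fun part =>
      ((PySem.Str.split? part "OR").getD []).map PySem.Str.strip), g ≠ [] := by
    intro g hg
    obtain ⟨part, -, rfl⟩ := List.mem_map.mp hg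
    have hOR := pvSplitOnGo_ne_nil "OR".toList (part.toList.length + 1) part.toList [] []
    simp [PySem.Str.split?, PySem.Chars.split?, PySem.Chars.splitOn] at hOR ⊢
    exact hOR
  rw [← pvSection_eq _ hne, List.map_map]
  rfl
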